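-- pv_equiv track=rewrite | github.com/fredy060795/lpu5-tactical | cot_listener_service.py | _extract_cot_events
-- ===== SOURCE A (Python) =====
-- from typing import Any, Callable, Dict, List, Optional, Tuple
--
-- def _extract_cot_events(data: str) -> List[str]:
--     """
--     Extract all complete ``<event …>…</event>`` blocks from *data*.
--
--     Returns a list of XML strings, each containing exactly one CoT event.
--     Handles multiple events packed into a single TCP segment and strips any
--     TAK auth ``<auth>…</auth>`` preambles automatically.
--     """
--     events: List[str] = []
--     search_from = 0
--     while True:
--         # Find the next opening tag (with or without attributes)
--         idx_space = data.find("<event ", search_from)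
--         idx_plain = data.find("<event>", search_from)
--         if idx_space == -1 and idx_plain == -1:
--             break
--         # Pick the earlier occurrence
--         if idx_space == -1:
--             start = idx_plain
--         elif idx_plain == -1:
--             start = idx_space
--         else:
--             start = min(idx_space, idx_plain)
--
--         end = data.find("</event>", start)
--         if end == -1:
--             break  # incomplete – wait for more data
--         end += len("</event>")
--         events.append(data[start:end])
--         search_from = end
--     return events
-- ===== SOURCE B (Python) =====
-- from typing import List
--
--
-- def _extract_cot_events(data: str) -> List[str]:
--     """Split on the closing tag: every piece before a ``</event>`` that
--     contains an opening tag holds exactly one complete event block."""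
--     events: List[str] = []
--     chunks = data.split("</event>")
--     for chunk in chunks[:-1]:
--         idx_space = chunk.find("<event ")
--         idx_plain = chunk.find("<event>")
--         if idx_space == -1:
--             start = idx_plain
--         elif idx_plain == -1:
--             start = idx_space
--         else:
--             start = min(idx_space, idx_plain)
--         if start != -1:
--             events.append(chunk[start:] + "</event>")
--     return events
-- ===== Notes on version B (the rewrite author's own statement) =====
-- stated objective: alternative
-- what changed: Replaces the stateful while/str.find index loop (three finds per iteration, resuming past each match) with a single split on the closing tag followed by an independent opener scan inside each complete chunk.
import Mathlib
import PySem

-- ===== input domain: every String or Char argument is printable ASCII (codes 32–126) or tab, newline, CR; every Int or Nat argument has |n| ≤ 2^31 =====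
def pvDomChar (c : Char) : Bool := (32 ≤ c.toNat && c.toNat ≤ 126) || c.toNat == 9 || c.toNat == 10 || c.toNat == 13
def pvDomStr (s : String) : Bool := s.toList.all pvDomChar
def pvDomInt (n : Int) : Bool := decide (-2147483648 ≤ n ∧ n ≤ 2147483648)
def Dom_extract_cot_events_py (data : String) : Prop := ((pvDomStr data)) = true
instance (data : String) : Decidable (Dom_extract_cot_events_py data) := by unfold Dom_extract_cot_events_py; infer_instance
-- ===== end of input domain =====

-- B re-implements the extraction by splitting on "</event>" and scanning each complete
-- chunk for its earliest opening tag, instead of A's resuming while/find index loop;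
-- same results, a different decomposition of the scan (objective: alternative).

-- ===== PORT A =====
def pvOpenSpace : List Char := ['<','e','v','e','n','t',' ']
def pvOpenPlain : List Char := ['<','e','v','e','n','t','>']
def pvCloserTag : List Char := ['<','/','e','v','e','n','t','>']

-- facts about findFrom used by the loop's termination argument (and the proofs below)
lemma pv_findFrom_gt (s sub : List Char) (k : Int) (hk : (s.length : Int) < k) :
    PySem.Chars.findFrom s sub k = -1 := by
  simp only [PySem.Chars.findFrom]
  split_ifs with h1 h2 <;> try rfl
  · omega
  · exfalso; omega

lemma pv_findFrom_facts (s sub : List Char) (k : Nat)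
    (h : PySem.Chars.findFrom s sub (k : Int) ≠ -1) :
    k ≤ s.length ∧ (k : Int) ≤ PySem.Chars.findFrom s sub (k : Int) ∧
      PySem.Chars.findFrom s sub (k : Int) ≤ (s.length : Int) := by
  by_cases hk : k ≤ s.length
  · rw [PySem.Chars.findFrom_natCast s sub k hk] at h ⊢
    split_ifs at h ⊢ with hf
    · exact absurd rfl h
    · have h1 := PySem.Chars.neg_one_le_find (List.drop k s) sub
      have h2 := PySem.Chars.find_le_length (List.drop k s) sub
      simp only [List.length_drop] at h2
      refine ⟨hk, by omega, by omega⟩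
  · exact absurd (pv_findFrom_gt s sub k (by omega)) h

def extract_cot_events_py_loop (data : List Char) (events : List (List Char)) (searchFrom : Nat) :
    List (List Char) :=
  let idx_space := PySem.Chars.findFrom data pvOpenSpace (searchFrom : Int)
  let idx_plain := PySem.Chars.findFrom data pvOpenPlain (searchFrom : Int)
  if h1 : idx_space = -1 ∧ idx_plain = -1 then events
  else
    let start : Int :=
      if idx_space = -1 then idx_plain
      else if idx_plain = -1 then idx_space
      else min idx_space idx_plain
    let endIdx := PySem.Chars.findFrom data pvCloserTag start
    if h2 : endIdx = -1 then events
    else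
      extract_cot_events_py_loop data
        (events ++ [PySem.List.slice data (some start) (some (endIdx + 8))])
        (endIdx + 8).toNat
termination_by data.length + 1 - searchFrom
decreasing_by
  simp only [endIdx, start, idx_space, idx_plain] at h1 h2 ⊢
  by_cases e1 : PySem.Chars.findFrom data pvOpenSpace (searchFrom : Int) = -1 <;>
    by_cases e2 : PySem.Chars.findFrom data pvOpenPlain (searchFrom : Int) = -1
  · exact absurd ⟨e1, e2⟩ h1
  · rw [dif_pos e1] at h2 ⊢
    have f2 := pv_findFrom_facts data pvOpenPlain searchFrom e2
    set B := PySem.Chars.findFrom data pvOpenPlain (searchFrom : Int) with hB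
    have h0 : B = ((B.toNat : Nat) : Int) := (Int.toNat_of_nonneg (by omega)).symm
    rw [h0] at h2 ⊢
    have he := pv_findFrom_facts data pvCloserTag B.toNat h2
    omega
  · rw [dif_neg e1, dif_pos e2] at h2 ⊢
    have f1 := pv_findFrom_facts data pvOpenSpace searchFrom e1
    set A := PySem.Chars.findFrom data pvOpenSpace (searchFrom : Int) with hA
    have h0 : A = ((A.toNat : Nat) : Int) := (Int.toNat_of_nonneg (by omega)).symm
    rw [h0] at h2 ⊢
    have he := pv_findFrom_facts data pvCloserTag A.toNat h2
    omega
  · rw [dif_neg e1, dif_neg e2] at h2 ⊢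
    have f1 := pv_findFrom_facts data pvOpenSpace searchFrom e1
    have f2 := pv_findFrom_facts data pvOpenPlain searchFrom e2
    set M := min (PySem.Chars.findFrom data pvOpenSpace (searchFrom : Int))
      (PySem.Chars.findFrom data pvOpenPlain (searchFrom : Int)) with hM
    have h0 : M = ((M.toNat : Nat) : Int) := (Int.toNat_of_nonneg (by omega)).symm
    rw [h0] at h2 ⊢
    have he := pv_findFrom_facts data pvCloserTag M.toNat h2
    omega

def extract_cot_events_py (data : String) : List String :=
  (extract_cot_events_py_loop data.toList [] 0).map (fun cs => String.ofList cs)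

-- ===== PORT B =====
def extract_cot_events_py_alt (data : String) : List String :=
  let chunks := PySem.Chars.splitOn data.toList pvCloserTag
  (chunks.dropLast.foldl
    (fun events chunk =>
      let idx_space := PySem.Chars.find chunk pvOpenSpace
      let idx_plain := PySem.Chars.find chunk pvOpenPlain
      let start : Int :=
        if idx_space = -1 then idx_plain
        else if idx_plain = -1 then idx_space
        else min idx_space idx_plain
      if start ≠ -1 then events ++ [PySem.List.slice chunk (some start) none ++ pvCloserTag]
      else events)
    []).map (fun cs => String.ofList cs)

-- ===== PRECONDITION & SPEC =====
def Spec_extract_cot_events_py (data : String) (out : List String) : Prop := out = extract_cot_events_py_alt data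
instance (data : String) (out : List String) : Decidable (Spec_extract_cot_events_py data out) := by unfold Spec_extract_cot_events_py; infer_instance

-- ===== CLAIM (what is proved, stated in full; the proofs are below) =====
def Claim_equal_extract_cot_events_py : Prop := ∀ (data : String), Dom_extract_cot_events_py data → Spec_extract_cot_events_py data (extract_cot_events_py data)

-- ===== LEMMAS AND PROOFS =====

-- proof-side vocabulary
def pvOcc (pat s : List Char) (i : Nat) : Prop := pat <+: s.drop i

def pvComb (a b : Int) : Int := if a = -1 then b else if b = -1 then a else min a b

def pvStart (l : List Char) : Int :=
  pvComb (PySem.Chars.find l pvOpenSpace) (PySem.Chars.find l pvOpenPlain)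

def pvP (l : List Char) : Bool := decide (pvStart l ≠ -1)

def pvF (l : List Char) : List Char :=
  PySem.List.slice l (some (pvStart l)) none ++ pvCloserTag

def pvBresL (s : List Char) : List (List Char) :=
  ((PySem.Chars.splitOn s pvCloserTag).dropLast.filter pvP).map pvF

def pvPre' (x : List Char) (ls : List (List Char)) : List (List Char) :=
  match ls with | [] => [x] | p :: ps => (x ++ p) :: ps

def pvStartFrom (data : List Char) (k : Nat) : Int :=
  if PySem.Chars.findFrom data pvOpenSpace (k : Int) = -1 then
    PySem.Chars.findFrom data pvOpenPlain (k : Int)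
  else if PySem.Chars.findFrom data pvOpenPlain (k : Int) = -1 then
    PySem.Chars.findFrom data pvOpenSpace (k : Int)
  else min (PySem.Chars.findFrom data pvOpenSpace (k : Int))
    (PySem.Chars.findFrom data pvOpenPlain (k : Int))

-- occurrences
lemma pv_occ_drop (pat s : List Char) (k i : Nat) : pvOcc pat (s.drop k) i ↔ pvOcc pat s (k + i) := by
  simp [pvOcc, List.drop_drop]

lemma pv_occ_cons (pat : List Char) (c : Char) (rest : List Char) (i : Nat) :
    pvOcc pat (c :: rest) (i + 1) ↔ pvOcc pat rest i := by
  simp [pvOcc]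

lemma pv_occ_take (pat s : List Char) (j i : Nat) (hp : pat ≠ []) :
    pvOcc pat (s.take j) i ↔ pvOcc pat s i ∧ i + pat.length ≤ j := by
  have hlen : 0 < pat.length := List.length_pos_of_ne_nil hp
  simp only [pvOcc, List.drop_take, List.prefix_take_iff]
  constructor
  · rintro ⟨h1, h2⟩; exact ⟨h1, by omega⟩
  · rintro ⟨h1, h2⟩; exact ⟨h1, by omega⟩

lemma pv_occ_length (pat s : List Char) (i : Nat) (hp : pat ≠ []) (h : pvOcc pat s i) :
    i + pat.length ≤ s.length := by
  rcases Nat.lt_or_ge s.length i with hi | hi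
  · exfalso
    have hd : s.drop i = [] := List.drop_eq_nil_of_le (by omega)
    rw [pvOcc, hd] at h
    exact hp (List.prefix_nil.mp h)
  · have := h.length_le; simp only [List.length_drop] at this; omega

-- find / findFrom characterizations
lemma pv_find_none_iff (s sub : List Char) :
    PySem.Chars.find s sub = -1 ↔ ∀ i, ¬ pvOcc sub s i := by
  rw [PySem.Chars.find_eq_neg_one_iff, ← PySem.Chars.isIn_iff_infix,
    ← PySem.Chars.exists_prefix_drop_iff_isIn]
  push_neg
  exact Iff.rfl

lemma pv_find_cases (s sub : List Char) :
    PySem.Chars.find s sub = -1 ∨ ∃ j : Nat, PySem.Chars.find s sub = (j : Int) := by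
  rcases eq_or_ne (PySem.Chars.find s sub) (-1) with h | h
  · exact Or.inl h
  · right
    have h0 := PySem.Chars.neg_one_le_find s sub
    exact ⟨(PySem.Chars.find s sub).toNat, (Int.toNat_of_nonneg (by omega)).symm⟩

lemma pv_find_spec' (s sub : List Char) (j : Nat) (h : PySem.Chars.find s sub = (j : Int)) :
    pvOcc sub s j ∧ ∀ i < j, ¬ pvOcc sub s i := by
  have h0 : 0 ≤ PySem.Chars.find s sub := by rw [h]; exact Int.natCast_nonneg j
  have hs := PySem.Chars.find_spec (s := s) (sub := sub) h0
  rw [h] at hs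
  simpa [pvOcc] using hs

lemma pv_find_first (s sub : List Char) (j : Nat) (hj : pvOcc sub s j)
    (hmin : ∀ i < j, ¬ pvOcc sub s i) : PySem.Chars.find s sub = (j : Int) := by
  have hne : PySem.Chars.find s sub ≠ -1 :=
    fun hEq => (pv_find_none_iff s sub).mp hEq j hj
  rcases pv_find_cases s sub with h | ⟨j', hj'⟩
  · exact absurd h hne
  · obtain ⟨hocc', hmin'⟩ := pv_find_spec' s sub j' hj'
    rcases lt_trichotomy j' j with h | h | h
    · exact absurd hocc' (hmin j' h)
    · rw [hj', h]
    · exact absurd hj (hmin' j h)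

lemma pv_findFrom_first (s sub : List Char) (k j : Nat) (hkl : k ≤ s.length) (hkj : k ≤ j)
    (hocc : pvOcc sub s j) (hmin : ∀ i, k ≤ i → i < j → ¬ pvOcc sub s i) :
    PySem.Chars.findFrom s sub (k : Int) = (j : Int) := by
  have hfind : PySem.Chars.find (s.drop k) sub = ((j - k : Nat) : Int) := by
    apply pv_find_first
    · rw [pv_occ_drop]
      have : k + (j - k) = j := by omega
      rw [this]; exact hocc
    · intro i hi hocc'
      rw [pv_occ_drop] at hocc'
      exact hmin (k + i) (by omega) (by omega) hocc'
  rw [PySem.Chars.findFrom_natCast s sub k hkl, hfind, if_neg (by omega)]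
  omega

lemma pv_findFrom_occ (s sub : List Char) (k : Nat)
    (h : PySem.Chars.findFrom s sub (k : Int) ≠ -1) :
    ∃ jn : Nat, PySem.Chars.findFrom s sub (k : Int) = (jn : Int) ∧ k ≤ jn ∧
      pvOcc sub s jn ∧ ∀ i, k ≤ i → i < jn → ¬ pvOcc sub s i := by
  have hkl : k ≤ s.length := (pv_findFrom_facts s sub k h).1
  obtain ⟨h1, h2, h3⟩ := PySem.Chars.findFrom_natCast_spec s sub k hkl h
  exact ⟨(PySem.Chars.findFrom s sub (k : Int)).toNat, (Int.toNat_of_nonneg (by omega)).symm,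
    by omega, h2, fun i hki hij => h3 i hki hij⟩

lemma pv_findFrom_zero' (s O : List Char) :
    PySem.Chars.findFrom s O ((0 : Nat) : Int) = PySem.Chars.find s O := by
  simp

lemma pv_startFrom_zero (s : List Char) : pvStartFrom s 0 = pvStart s := by
  unfold pvStartFrom pvStart pvComb
  rw [pv_findFrom_zero', pv_findFrom_zero']

lemma pv_findFrom_shift (s sub : List Char) (k r : Nat) (hk : k ≤ s.length) :
    PySem.Chars.findFrom s sub ((k + r : Nat) : Int)
      = if PySem.Chars.findFrom (s.drop k) sub ((r : Nat) : Int) = -1 then -1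
        else (k : Int) + PySem.Chars.findFrom (s.drop k) sub ((r : Nat) : Int) := by
  by_cases hr : r ≤ (s.drop k).length
  · rw [PySem.Chars.findFrom_natCast (s.drop k) sub r hr,
      PySem.Chars.findFrom_natCast s sub (k + r)
        (by simp only [List.length_drop] at hr; omega),
      List.drop_drop]
    have := PySem.Chars.neg_one_le_find (List.drop (k + r) s) sub
    split_ifs <;> push_cast <;> omega
  · have h2 : PySem.Chars.findFrom (s.drop k) sub ((r : Nat) : Int) = -1 :=
      pv_findFrom_gt _ _ _ (by push_cast; omega)
    have h1 : PySem.Chars.findFrom s sub ((k + r : Nat) : Int) = -1 :=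
      pv_findFrom_gt _ _ _ (by simp only [List.length_drop] at hr; push_cast; omega)
    rw [h1, h2]
    simp

lemma pv_find_eq_findFrom_of_no_early (s O : List Char) (k : Nat) (hk : k ≤ s.length)
    (hO : O ≠ []) (hno : ∀ m < k, ¬ pvOcc O s m) :
    PySem.Chars.find s O = PySem.Chars.findFrom s O (k : Int) := by
  rw [PySem.Chars.findFrom_natCast s O k hk]
  rcases pv_find_cases (s.drop k) O with hd | ⟨r, hd⟩
  · rw [hd, if_pos rfl]
    rw [pv_find_none_iff]
    intro i hocc
    rcases Nat.lt_or_ge i k with hik | hik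
    · exact hno i hik hocc
    · exact (pv_find_none_iff _ _).mp hd (i - k)
        ((pv_occ_drop O s k (i - k)).mpr (by rwa [show k + (i - k) = i from by omega]))
  · obtain ⟨hocc, hmin⟩ := pv_find_spec' (s.drop k) O r hd
    rw [hd, if_neg (by omega)]
    have : PySem.Chars.find s O = ((k + r : Nat) : Int) := by
      apply pv_find_first
      · exact (pv_occ_drop O s k r).mp hocc
      · intro i hi hocc'
        rcases Nat.lt_or_ge i k with hik | hik
        · exact hno i hik hocc'
        · exact hmin (i - k) (by omega)
            ((pv_occ_drop O s k (i - k)).mpr (by rwa [show k + (i - k) = i from by omega]))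
    rw [this]
    push_cast
    ring

-- character-level disjointness of the opener and closer tags
lemma pv_occ_getElem (pat s : List Char) (i m : Nat) (h : pvOcc pat s i) (hm : m < pat.length) :
    ∃ hb : i + m < s.length, s[i + m] = pat[m] := by
  have hlen : pat.length ≤ (s.drop i).length := h.length_le
  have hb' : m < (s.drop i).length := lt_of_lt_of_le hm hlen
  have he := h.getElem (i := m) hm
  rw [List.getElem_drop] at he
  have hb : i + m < s.length := by
    simp only [List.length_drop] at hb'; omega
  exact ⟨hb, he.symm⟩

lemma pv_occ_getD (pat s : List Char) (i m : Nat) (h : pvOcc pat s i) (hm : m < pat.length) :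
    s.getD (i + m) ' ' = pat.getD m ' ' := by
  obtain ⟨hb, he⟩ := pv_occ_getElem pat s i m h hm
  rw [List.getD_eq_getElem s ' ' hb, List.getD_eq_getElem pat ' ' hm]
  exact he

lemma pv_no_overlap (s O : List Char) (hO : O = pvOpenSpace ∨ O = pvOpenPlain)
    (i j : Nat) (hoi : pvOcc O s i) (hcj : pvOcc pvCloserTag s j) :
    i + 7 ≤ j ∨ j + 8 ≤ i := by
  by_contra hcon
  push_neg at hcon
  obtain ⟨hc1, hc2⟩ := hcon
  have hOlen : O.length = 7 := by rcases hO with h | h <;> simp [h, pvOpenSpace, pvOpenPlain]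
  rcases Nat.lt_or_ge i j with hij | hij
  · -- i < j, j - i ≤ 6 : s[j] is both O[j-i] and '<'
    have e1 := pv_occ_getD O s i (j - i) hoi (by omega)
    have e2 := pv_occ_getD pvCloserTag s j 0 hcj (by simp [pvCloserTag])
    rw [show i + (j - i) = j from by omega] at e1
    rw [Nat.add_zero] at e2
    have heq := e1.symm.trans e2
    obtain ⟨d, hd⟩ : ∃ d, j - i = d := ⟨_, rfl⟩
    rw [hd] at heq
    have hd1 : 1 ≤ d := by omega
    have hd6 : d ≤ 6 := by omega
    rcases hO with hO' | hO' <;> subst hO' <;> interval_cases d <;>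
      exact absurd heq (by decide)
  · rcases Nat.eq_or_lt_of_le hij with hij' | hij'
    · -- i = j : position i+1 is both O[1] = 'e' and '/' from the closer
      have e1 := pv_occ_getD O s i 1 hoi (by omega)
      have e2 := pv_occ_getD pvCloserTag s j 1 hcj (by simp [pvCloserTag])
      rw [show j + 1 = i + 1 from by omega] at e2
      have heq := e1.symm.trans e2
      rcases hO with hO' | hO' <;> subst hO' <;> exact absurd heq (by decide)
    · -- j < i, i - j ≤ 7 : s[i] is both O[0] = '<' and closer[i-j]
      have e1 := pv_occ_getD O s i 0 hoi (by omega)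
      have e2 := pv_occ_getD pvCloserTag s j (i - j) hcj (by simp [pvCloserTag]; omega)
      rw [Nat.add_zero] at e1
      rw [show j + (i - j) = i from by omega] at e2
      have heq := e1.symm.trans e2
      obtain ⟨d, hd⟩ : ∃ d, i - j = d := ⟨_, rfl⟩
      rw [hd] at heq
      have hd1 : 1 ≤ d := by omega
      have hd7 : d ≤ 7 := by omega
      rcases hO with hO' | hO' <;> subst hO' <;> interval_cases d <;>
        exact absurd heq (by decide)

-- splitOn characterization
lemma pv_go_zero (sep l cur : List Char) (acc : List (List Char)) :
    PySem.Chars.splitOn.go sep 0 l cur acc = ((cur.reverse ++ l) :: acc).reverse := rfl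

lemma pv_go_nil (sep : List Char) (f : Nat) (cur : List Char) (acc : List (List Char)) :
    PySem.Chars.splitOn.go sep (f+1) [] cur acc = (cur.reverse :: acc).reverse := rfl

lemma pv_go_cons (sep : List Char) (f : Nat) (c : Char) (rest cur : List Char)
    (acc : List (List Char)) :
    PySem.Chars.splitOn.go sep (f+1) (c :: rest) cur acc =
      if sep.isPrefixOf (c :: rest) then
        PySem.Chars.splitOn.go sep f (List.drop sep.length (c :: rest)) [] (cur.reverse :: acc)
      else PySem.Chars.splitOn.go sep f rest (c :: cur) acc := rfl

lemma pv_go_ne_nil (sep : List Char) : ∀ (fuel : Nat) (l cur : List Char) (acc : List (List Char)),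
    PySem.Chars.splitOn.go sep fuel l cur acc ≠ [] := by
  intro fuel
  induction fuel with
  | zero => intro l cur acc; rw [pv_go_zero]; simp
  | succ f ih =>
    intro l cur acc
    cases l with
    | nil => rw [pv_go_nil]; simp
    | cons c rest =>
      rw [pv_go_cons]
      split_ifs <;> apply ih

lemma pv_splitOn_ne_nil (s sep : List Char) : PySem.Chars.splitOn s sep ≠ [] :=
  pv_go_ne_nil sep (s.length + 1) s [] []

lemma pv_pvPre'_append (x y : List Char) (ls : List (List Char)) :
    pvPre' x (pvPre' y ls) = pvPre' (x ++ y) ls := by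
  cases ls <;> simp [pvPre']

lemma pv_pvPre'_nil_of_ne (ls : List (List Char)) (h : ls ≠ []) : pvPre' [] ls = ls := by
  cases ls with
  | nil => exact absurd rfl h
  | cons p ps => simp [pvPre']

lemma pv_go_spec (sep : List Char) (hsep : sep ≠ []) :
    ∀ (fuel : Nat) (l cur : List Char) (acc : List (List Char)), l.length < fuel →
      PySem.Chars.splitOn.go sep fuel l cur acc
        = acc.reverse ++ pvPre' cur.reverse (PySem.Chars.splitOn l sep) := by
  have hsl : 0 < sep.length := List.length_pos_of_ne_nil hsep
  intro fuel
  induction fuel using Nat.strong_induction_on with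
  | _ fuel ih =>
    intro l cur acc h
    cases fuel with
    | zero => omega
    | succ f =>
      cases l with
      | nil =>
        rw [pv_go_nil]
        show _ = acc.reverse ++ pvPre' cur.reverse [[]]
        simp [pvPre']
      | cons c rest =>
        simp only [List.length_cons] at h
        have hsplit : PySem.Chars.splitOn (c :: rest) sep =
            if sep.isPrefixOf (c :: rest) then
              [] :: PySem.Chars.splitOn (List.drop sep.length (c :: rest)) sep
            else pvPre' [c] (PySem.Chars.splitOn rest sep) := by
          show PySem.Chars.splitOn.go sep ((c :: rest).length + 1) (c :: rest) [] [] = _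
          simp only [List.length_cons]
          rw [pv_go_cons]
          split_ifs with hpre
          · rw [ih (rest.length + 1) (by omega) _ _ _
              (by simp only [List.length_drop, List.length_cons]; omega)]
            simp only [List.reverse_nil, List.reverse_cons, List.nil_append]
            rw [pv_pvPre'_nil_of_ne _ (pv_splitOn_ne_nil _ _)]
            rfl
          · rw [ih (rest.length + 1) (by omega) _ _ _ (by omega)]
            simp [pvPre']
        rw [pv_go_cons, hsplit]
        split_ifs with hpre
        · rw [ih f (by omega) _ _ _
            (by simp only [List.length_drop, List.length_cons]; omega)]
          simp only [List.reverse_cons, List.reverse_nil, List.nil_append]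
          rw [pv_pvPre'_nil_of_ne _ (pv_splitOn_ne_nil _ _)]
          simp [pvPre']
        · rw [ih f (by omega) _ _ _ (by omega)]
          rw [List.reverse_cons, pv_pvPre'_append]

lemma pv_splitOn_cons_pos (sep : List Char) (c : Char) (rest : List Char) (hsep : sep ≠ [])
    (h : sep.isPrefixOf (c :: rest)) :
    PySem.Chars.splitOn (c :: rest) sep
      = [] :: PySem.Chars.splitOn (List.drop sep.length (c :: rest)) sep := by
  have hsl : 0 < sep.length := List.length_pos_of_ne_nil hsep
  show PySem.Chars.splitOn.go sep ((c :: rest).length + 1) (c :: rest) [] [] = _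
  simp only [List.length_cons]
  rw [pv_go_cons, if_pos h]
  rw [pv_go_spec sep hsep (rest.length + 1) _ _ _
    (by simp only [List.length_drop, List.length_cons]; omega)]
  simp only [List.reverse_nil, List.reverse_cons, List.nil_append]
  rw [pv_pvPre'_nil_of_ne _ (pv_splitOn_ne_nil _ _)]
  rfl

lemma pv_splitOn_cons_neg (sep : List Char) (c : Char) (rest : List Char) (hsep : sep ≠ [])
    (h : ¬ sep.isPrefixOf (c :: rest)) :
    PySem.Chars.splitOn (c :: rest) sep = pvPre' [c] (PySem.Chars.splitOn rest sep) := by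
  show PySem.Chars.splitOn.go sep ((c :: rest).length + 1) (c :: rest) [] [] = _
  simp only [List.length_cons]
  rw [pv_go_cons, if_neg h]
  rw [pv_go_spec sep hsep (rest.length + 1) _ _ _ (by omega)]
  simp [pvPre']

lemma pv_splitOn_none (s sep : List Char) (hsep : sep ≠ [])
    (h : PySem.Chars.find s sep = -1) : PySem.Chars.splitOn s sep = [s] := by
  induction s with
  | nil => rfl
  | cons c rest ih =>
    have hno := (pv_find_none_iff _ _).mp h
    have hnpre : ¬ sep.isPrefixOf (c :: rest) := by
      intro hp
      exact hno 0 (by simpa [pvOcc] using (List.isPrefixOf_iff_prefix.mp hp))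
    rw [pv_splitOn_cons_neg sep c rest hsep hnpre]
    have hrest : PySem.Chars.find rest sep = -1 := by
      rw [pv_find_none_iff]
      intro i hocc
      exact hno (i + 1) ((pv_occ_cons sep c rest i).mpr hocc)
    rw [ih hrest]
    rfl

lemma pv_splitOn_at (sep : List Char) (hsep : sep ≠ []) :
    ∀ (j : Nat) (s : List Char), PySem.Chars.find s sep = (j : Int) →
      PySem.Chars.splitOn s sep
        = s.take j :: PySem.Chars.splitOn (s.drop (j + sep.length)) sep := by
  intro j
  induction j with
  | zero =>
    intro s h
    obtain ⟨hocc, _⟩ := pv_find_spec' s sep 0 h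
    have hpre : sep <+: s := by simpa [pvOcc] using hocc
    cases s with
    | nil => exact absurd (List.prefix_nil.mp hpre) hsep
    | cons c rest =>
      rw [pv_splitOn_cons_pos sep c rest hsep (List.isPrefixOf_iff_prefix.mpr hpre)]
      simp
  | succ j ih =>
    intro s h
    obtain ⟨hocc, hmin⟩ := pv_find_spec' s sep (j + 1) h
    cases s with
    | nil =>
      exfalso
      have := pv_occ_length sep [] (j+1) hsep hocc
      have hsl : 0 < sep.length := List.length_pos_of_ne_nil hsep
      simp at this
    | cons c rest =>
      have hnpre : ¬ sep.isPrefixOf (c :: rest) := by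
        intro hp
        exact hmin 0 (by omega) (by simpa [pvOcc] using (List.isPrefixOf_iff_prefix.mp hp))
      rw [pv_splitOn_cons_neg sep c rest hsep hnpre]
      have hrest : PySem.Chars.find rest sep = (j : Int) := by
        apply pv_find_first
        · exact (pv_occ_cons sep c rest j).mp hocc
        · intro i hi hocc'
          exact hmin (i + 1) (by omega) ((pv_occ_cons sep c rest i).mpr hocc')
      rw [ih rest hrest]
      rw [List.take_succ_cons, show j + 1 + sep.length = (j + sep.length) + 1 from by omega,
        List.drop_succ_cons]
      rfl

-- the loop: one-step unfolding, accumulator, shift and skip lemmas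
lemma pv_loop_unfold (data : List Char) (events : List (List Char)) (k : Nat) :
    extract_cot_events_py_loop data events k =
      if PySem.Chars.findFrom data pvOpenSpace (k : Int) = -1 ∧
          PySem.Chars.findFrom data pvOpenPlain (k : Int) = -1 then events
      else if PySem.Chars.findFrom data pvCloserTag (pvStartFrom data k) = -1 then events
      else
        extract_cot_events_py_loop data
          (events ++ [PySem.List.slice data (some (pvStartFrom data k))
            (some (PySem.Chars.findFrom data pvCloserTag (pvStartFrom data k) + 8))])
          (PySem.Chars.findFrom data pvCloserTag (pvStartFrom data k) + 8).toNat := by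
  rw [extract_cot_events_py_loop.eq_def]
  simp only [pvStartFrom]
  split_ifs <;> rfl

lemma pv_step_bounds (data : List Char) (k : Nat)
    (h1 : ¬(PySem.Chars.findFrom data pvOpenSpace (k : Int) = -1 ∧
            PySem.Chars.findFrom data pvOpenPlain (k : Int) = -1))
    (h2 : PySem.Chars.findFrom data pvCloserTag (pvStartFrom data k) ≠ -1) :
    k ≤ data.length ∧ (k : Int) ≤ pvStartFrom data k ∧ 0 ≤ pvStartFrom data k ∧
      pvStartFrom data k ≤ PySem.Chars.findFrom data pvCloserTag (pvStartFrom data k) ∧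
      (PySem.Chars.findFrom data pvCloserTag (pvStartFrom data k) + 8).toNat ≤ data.length ∧
      pvOcc pvCloserTag data
        (PySem.Chars.findFrom data pvCloserTag (pvStartFrom data k)).toNat := by
  have hstart : (k : Int) ≤ pvStartFrom data k ∧ 0 ≤ pvStartFrom data k ∧
      pvStartFrom data k ≤ (data.length : Int) ∧ k ≤ data.length := by
    unfold pvStartFrom
    by_cases e1 : PySem.Chars.findFrom data pvOpenSpace (k : Int) = -1 <;>
      by_cases e2 : PySem.Chars.findFrom data pvOpenPlain (k : Int) = -1
    · exact absurd ⟨e1, e2⟩ h1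
    · have f2 := pv_findFrom_facts data pvOpenPlain k e2
      rw [if_pos e1]
      exact ⟨f2.2.1, by omega, f2.2.2, f2.1⟩
    · have f1 := pv_findFrom_facts data pvOpenSpace k e1
      rw [if_neg e1, if_pos e2]
      exact ⟨f1.2.1, by omega, f1.2.2, f1.1⟩
    · have f1 := pv_findFrom_facts data pvOpenSpace k e1
      have f2 := pv_findFrom_facts data pvOpenPlain k e2
      rw [if_neg e1, if_neg e2]
      refine ⟨by omega, by omega, by omega, f1.1⟩
  obtain ⟨ha, hb, hcle, hklen⟩ := hstart
  have hstn : pvStartFrom data k = (((pvStartFrom data k).toNat : Nat) : Int) :=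
    (Int.toNat_of_nonneg hb).symm
  rw [hstn] at h2 ⊢
  obtain ⟨jn, hjn, hkj, hocc, _⟩ := pv_findFrom_occ data pvCloserTag _ h2
  have hjlen : jn + 8 ≤ data.length := by
    have := pv_occ_length pvCloserTag data jn (by simp [pvCloserTag]) hocc
    simpa [pvCloserTag] using this
  rw [hjn]
  refine ⟨hklen, by omega, by omega, by omega, by omega, ?_⟩
  rw [Int.toNat_natCast]
  exact hocc

lemma pv_loop_acc : ∀ (n : Nat) (data : List Char) (events : List (List Char)) (k : Nat),
    data.length + 1 - k = n →
    extract_cot_events_py_loop data events k = events ++ extract_cot_events_py_loop data [] k := by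
  intro n
  induction n using Nat.strong_induction_on with
  | _ n ih =>
    intro data events k hn
    rw [pv_loop_unfold data events k, pv_loop_unfold data [] k]
    by_cases h1 : (PySem.Chars.findFrom data pvOpenSpace (k : Int) = -1 ∧
        PySem.Chars.findFrom data pvOpenPlain (k : Int) = -1)
    · rw [if_pos h1, if_pos h1]; simp
    · rw [if_neg h1, if_neg h1]
      by_cases h2 : PySem.Chars.findFrom data pvCloserTag (pvStartFrom data k) = -1
      · rw [if_pos h2, if_pos h2]; simp
      · rw [if_neg h2, if_neg h2]
        obtain ⟨hklen, hka, hb, hcle, hle8, _⟩ := pv_step_bounds data k h1 h2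
        have hke : k < (PySem.Chars.findFrom data pvCloserTag (pvStartFrom data k) + 8).toNat := by
          omega
        rw [ih (data.length + 1 - (PySem.Chars.findFrom data pvCloserTag (pvStartFrom data k) + 8).toNat)
            (by omega) data
            (events ++ [PySem.List.slice data (some (pvStartFrom data k))
              (some (PySem.Chars.findFrom data pvCloserTag (pvStartFrom data k) + 8))])
            ((PySem.Chars.findFrom data pvCloserTag (pvStartFrom data k) + 8).toNat) rfl,
          ih (data.length + 1 - (PySem.Chars.findFrom data pvCloserTag (pvStartFrom data k) + 8).toNat)
            (by omega) data
            ([] ++ [PySem.List.slice data (some (pvStartFrom data k))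
              (some (PySem.Chars.findFrom data pvCloserTag (pvStartFrom data k) + 8))])
            ((PySem.Chars.findFrom data pvCloserTag (pvStartFrom data k) + 8).toNat) rfl]
        simp

lemma pv_loop_shift_core (s : List Char) (k : Nat) (hk : k ≤ s.length)
    (hstR : 0 ≤ pvStartFrom (s.drop k) 0)
    (hL : pvStartFrom s k = (k : Int) + pvStartFrom (s.drop k) 0)
    (ihyp : ∀ (s' : List Char) (k2 : Nat), s'.length - k2 < s.length - k → k2 ≤ s'.length →
      extract_cot_events_py_loop s' [] k2 = extract_cot_events_py_loop (s'.drop k2) [] 0) :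
    (if PySem.Chars.findFrom s pvCloserTag (pvStartFrom s k) = -1 then ([] : List (List Char))
     else extract_cot_events_py_loop s
       ([] ++ [PySem.List.slice s (some (pvStartFrom s k))
         (some (PySem.Chars.findFrom s pvCloserTag (pvStartFrom s k) + 8))])
       (PySem.Chars.findFrom s pvCloserTag (pvStartFrom s k) + 8).toNat)
    = (if PySem.Chars.findFrom (s.drop k) pvCloserTag (pvStartFrom (s.drop k) 0) = -1 then []
       else extract_cot_events_py_loop (s.drop k)
         ([] ++ [PySem.List.slice (s.drop k) (some (pvStartFrom (s.drop k) 0))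
           (some (PySem.Chars.findFrom (s.drop k) pvCloserTag (pvStartFrom (s.drop k) 0) + 8))])
         (PySem.Chars.findFrom (s.drop k) pvCloserTag (pvStartFrom (s.drop k) 0) + 8).toNat) := by
  obtain ⟨r, hr⟩ : ∃ r : Nat, pvStartFrom (s.drop k) 0 = ((r : Nat) : Int) :=
    ⟨(pvStartFrom (s.drop k) 0).toNat, (Int.toNat_of_nonneg hstR).symm⟩
  rw [hr] at hL
  rw [hr, hL]
  have hshift := pv_findFrom_shift s pvCloserTag k r hk
  rw [show ((k + r : Nat) : Int) = (k : Int) + (r : Int) from by push_cast; ring] at hshift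
  rw [hshift]
  by_cases hEn : PySem.Chars.findFrom (s.drop k) pvCloserTag ((r : Nat) : Int) = -1
  · rw [if_pos hEn]
    simp [hEn]
  · have fE := pv_findFrom_facts (s.drop k) pvCloserTag r hEn
    obtain ⟨jn, hjn, hrj, hoccE, _⟩ := pv_findFrom_occ (s.drop k) pvCloserTag r hEn
    have hjlen : jn + 8 ≤ (s.drop k).length := by
      have := pv_occ_length pvCloserTag (s.drop k) jn (by simp [pvCloserTag]) hoccE
      simpa [pvCloserTag] using this
    simp only [List.length_drop] at hjlen
    rw [if_neg hEn]
    rw [hjn]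
    rw [if_neg (show ¬((k : Int) + (jn : Int) = -1) from by omega),
      if_neg (show ¬((jn : Int) = -1) from by omega)]
    rw [show (((k : Int) + (jn : Int)) + 8).toNat = k + (jn + 8) from by omega,
      show (((jn : Int)) + 8).toNat = jn + 8 from by omega]
    rw [pv_loop_acc (s.length + 1 - (k + (jn + 8))) s _ _ rfl,
      pv_loop_acc ((s.drop k).length + 1 - (jn + 8)) (s.drop k) _ _ rfl]
    congr 1
    · -- the extracted blocks agree
      simp only [List.nil_append]
      congr 1
      rw [show ((k : Int) + (r : Int)) = ((k + r : Nat) : Int) from by push_cast; ring,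
        show (((k : Int) + (jn : Int)) + 8) = ((k + (jn + 8) : Nat) : Int) from by push_cast; ring,
        show (((jn : Int)) + 8) = ((jn + 8 : Nat) : Int) from by push_cast; ring]
      rw [PySem.List.slice_natCast, PySem.List.slice_natCast]
      rw [← List.drop_drop]
      congr 1
      omega
    · rw [ihyp s (k + (jn + 8)) (by omega) (by omega)]
      rw [ihyp (s.drop k) (jn + 8) (by simp only [List.length_drop]; omega)
        (by simp only [List.length_drop]; omega)]
      rw [List.drop_drop]

lemma pv_loop_shift : ∀ (n : Nat) (s : List Char) (k : Nat), s.length - k = n → k ≤ s.length →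
    extract_cot_events_py_loop s [] k = extract_cot_events_py_loop (s.drop k) [] 0 := by
  intro n
  induction n using Nat.strong_induction_on with
  | _ n ih =>
    intro s k hn hk
    have hs1 := pv_findFrom_shift s pvOpenSpace k 0 hk
    have hs2 := pv_findFrom_shift s pvOpenPlain k 0 hk
    simp only [Nat.add_zero] at hs1 hs2
    rw [pv_loop_unfold s [] k, pv_loop_unfold (s.drop k) [] 0]
    by_cases z1 : PySem.Chars.findFrom (s.drop k) pvOpenSpace ((0 : Nat) : Int) = -1 <;>
      by_cases z2 : PySem.Chars.findFrom (s.drop k) pvOpenPlain ((0 : Nat) : Int) = -1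
    · rw [if_pos ⟨by rw [hs1, if_pos z1], by rw [hs2, if_pos z2]⟩, if_pos ⟨z1, z2⟩]
    · have f2 := pv_findFrom_facts (s.drop k) pvOpenPlain 0 z2
      have hR : pvStartFrom (s.drop k) 0
          = PySem.Chars.findFrom (s.drop k) pvOpenPlain ((0 : Nat) : Int) := by
        unfold pvStartFrom; rw [if_pos z1]
      have hL : pvStartFrom s k = (k : Int) + pvStartFrom (s.drop k) 0 := by
        rw [hR]
        unfold pvStartFrom
        rw [hs1, hs2, if_pos z1, if_neg z2]
        simp
      have hcL : ¬(PySem.Chars.findFrom s pvOpenSpace (k : Int) = -1 ∧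
          PySem.Chars.findFrom s pvOpenPlain (k : Int) = -1) := by
        intro hc
        have := hc.2
        rw [hs2, if_neg z2] at this
        omega
      have hcR : ¬(PySem.Chars.findFrom (s.drop k) pvOpenSpace ((0 : Nat) : Int) = -1 ∧
          PySem.Chars.findFrom (s.drop k) pvOpenPlain ((0 : Nat) : Int) = -1) :=
        fun hc => z2 hc.2
      rw [if_neg hcL, if_neg hcR]
      exact pv_loop_shift_core s k hk (by rw [hR]; omega) hL
        (fun s' k2 hm hk2 => ih (s'.length - k2) (by omega) s' k2 rfl hk2)
    · have f1 := pv_findFrom_facts (s.drop k) pvOpenSpace 0 z1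
      have hR : pvStartFrom (s.drop k) 0
          = PySem.Chars.findFrom (s.drop k) pvOpenSpace ((0 : Nat) : Int) := by
        unfold pvStartFrom; rw [if_neg z1, if_pos z2]
      have hL : pvStartFrom s k = (k : Int) + pvStartFrom (s.drop k) 0 := by
        rw [hR]
        unfold pvStartFrom
        rw [hs1, hs2, if_neg z1, if_pos z2, if_neg (by omega), if_pos rfl]
      have hcL : ¬(PySem.Chars.findFrom s pvOpenSpace (k : Int) = -1 ∧
          PySem.Chars.findFrom s pvOpenPlain (k : Int) = -1) := by
        intro hc
        have := hc.1
        rw [hs1, if_neg z1] at this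
        omega
      have hcR : ¬(PySem.Chars.findFrom (s.drop k) pvOpenSpace ((0 : Nat) : Int) = -1 ∧
          PySem.Chars.findFrom (s.drop k) pvOpenPlain ((0 : Nat) : Int) = -1) :=
        fun hc => z1 hc.1
      rw [if_neg hcL, if_neg hcR]
      exact pv_loop_shift_core s k hk (by rw [hR]; omega) hL
        (fun s' k2 hm hk2 => ih (s'.length - k2) (by omega) s' k2 rfl hk2)
    · have f1 := pv_findFrom_facts (s.drop k) pvOpenSpace 0 z1
      have f2 := pv_findFrom_facts (s.drop k) pvOpenPlain 0 z2
      have hR : pvStartFrom (s.drop k) 0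
          = min (PySem.Chars.findFrom (s.drop k) pvOpenSpace ((0 : Nat) : Int))
              (PySem.Chars.findFrom (s.drop k) pvOpenPlain ((0 : Nat) : Int)) := by
        unfold pvStartFrom; rw [if_neg z1, if_neg z2]
      have hL : pvStartFrom s k = (k : Int) + pvStartFrom (s.drop k) 0 := by
        rw [hR]
        unfold pvStartFrom
        rw [hs1, hs2, if_neg z1, if_neg z2, if_neg (by omega), if_neg (by omega)]
        omega
      have hcL : ¬(PySem.Chars.findFrom s pvOpenSpace (k : Int) = -1 ∧
          PySem.Chars.findFrom s pvOpenPlain (k : Int) = -1) := by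
        intro hc
        have := hc.1
        rw [hs1, if_neg z1] at this
        omega
      have hcR : ¬(PySem.Chars.findFrom (s.drop k) pvOpenSpace ((0 : Nat) : Int) = -1 ∧
          PySem.Chars.findFrom (s.drop k) pvOpenPlain ((0 : Nat) : Int) = -1) :=
        fun hc => z1 hc.1
      rw [if_neg hcL, if_neg hcR]
      exact pv_loop_shift_core s k hk (by rw [hR]; omega) hL
        (fun s' k2 hm hk2 => ih (s'.length - k2) (by omega) s' k2 rfl hk2)

lemma pv_loop_skip (s : List Char) (k : Nat) (hk : k ≤ s.length)
    (hno : ∀ m < k, ¬ pvOcc pvOpenSpace s m ∧ ¬ pvOcc pvOpenPlain s m) :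
    extract_cot_events_py_loop s [] 0 = extract_cot_events_py_loop s [] k := by
  have e1 : PySem.Chars.find s pvOpenSpace = PySem.Chars.findFrom s pvOpenSpace (k : Int) :=
    pv_find_eq_findFrom_of_no_early s pvOpenSpace k hk (by simp [pvOpenSpace])
      (fun m hm => (hno m hm).1)
  have e2 : PySem.Chars.find s pvOpenPlain = PySem.Chars.findFrom s pvOpenPlain (k : Int) :=
    pv_find_eq_findFrom_of_no_early s pvOpenPlain k hk (by simp [pvOpenPlain])
      (fun m hm => (hno m hm).2)
  rw [pv_loop_unfold s [] 0, pv_loop_unfold s [] k]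
  simp only [pvStartFrom, pv_findFrom_zero']
  rw [e1, e2]

-- chunk-level finds
lemma pv_find_take_of_none (s O : List Char) (j : Nat) (hO : O ≠ [])
    (h : ∀ i < j, ¬ pvOcc O s i) : PySem.Chars.find (s.take j) O = -1 := by
  have hlen : 0 < O.length := List.length_pos_of_ne_nil hO
  rw [pv_find_none_iff]
  intro i hocc
  obtain ⟨hocc', hle⟩ := (pv_occ_take O s j i hO).mp hocc
  exact h i (by omega) hocc'

lemma pv_find_take_of_lt (s O : List Char) (j i : Nat) (hO : O = pvOpenSpace ∨ O = pvOpenPlain)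
    (h : PySem.Chars.find s O = (i : Int)) (hij : i < j) (hc : pvOcc pvCloserTag s j) :
    PySem.Chars.find (s.take j) O = (i : Int) := by
  have hOne : O ≠ [] := by rcases hO with h' | h' <;> simp [h', pvOpenSpace, pvOpenPlain]
  have hOlen : O.length = 7 := by rcases hO with h' | h' <;> simp [h', pvOpenSpace, pvOpenPlain]
  obtain ⟨hocc, hmin⟩ := pv_find_spec' s O i h
  have hsep : i + 7 ≤ j := by
    rcases pv_no_overlap s O hO i j hocc hc with h' | h'
    · exact h'
    · omega
  apply pv_find_first
  · rw [pv_occ_take O s j i hOne]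
    exact ⟨hocc, by omega⟩
  · intro m hm hocc'
    exact hmin m hm ((pv_occ_take O s j m hOne).mp hocc').1

-- start combination
lemma pv_start_neg_iff (l : List Char) :
    pvStart l = -1 ↔
      PySem.Chars.find l pvOpenSpace = -1 ∧ PySem.Chars.find l pvOpenPlain = -1 := by
  have h1 := PySem.Chars.neg_one_le_find l pvOpenSpace
  have h2 := PySem.Chars.neg_one_le_find l pvOpenPlain
  unfold pvStart pvComb
  split_ifs with hx hy <;> omega

lemma pv_start_eq_right (l : List Char) (i2 : Nat)
    (hF1 : PySem.Chars.find l pvOpenSpace = -1)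
    (hF2 : PySem.Chars.find l pvOpenPlain = (i2 : Int)) : pvStart l = (i2 : Int) := by
  unfold pvStart pvComb
  rw [hF1, hF2, if_pos rfl]

lemma pv_start_eq_left (l : List Char) (i1 : Nat)
    (hF1 : PySem.Chars.find l pvOpenSpace = (i1 : Int))
    (hF2 : PySem.Chars.find l pvOpenPlain = -1) : pvStart l = (i1 : Int) := by
  unfold pvStart pvComb
  rw [hF1, hF2, if_neg (by omega), if_pos rfl]

lemma pv_start_eq_min (l : List Char) (i1 i2 : Nat)
    (hF1 : PySem.Chars.find l pvOpenSpace = (i1 : Int))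
    (hF2 : PySem.Chars.find l pvOpenPlain = (i2 : Int)) :
    pvStart l = min (i1 : Int) (i2 : Int) := by
  unfold pvStart pvComb
  rw [hF1, hF2, if_neg (by omega), if_neg (by omega)]

lemma pv_start_spec (l : List Char) (h : pvStart l ≠ -1) :
    0 ≤ pvStart l ∧
      (pvOcc pvOpenSpace l (pvStart l).toNat ∨ pvOcc pvOpenPlain l (pvStart l).toNat) ∧
      ∀ m < (pvStart l).toNat, ¬ pvOcc pvOpenSpace l m ∧ ¬ pvOcc pvOpenPlain l m := by
  rcases pv_find_cases l pvOpenSpace with hF1 | ⟨i1, hF1⟩ <;>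
    rcases pv_find_cases l pvOpenPlain with hF2 | ⟨i2, hF2⟩
  · exact absurd ((pv_start_neg_iff l).mpr ⟨hF1, hF2⟩) h
  · obtain ⟨hocc2, hmin2⟩ := pv_find_spec' l pvOpenPlain i2 hF2
    have hall1 := (pv_find_none_iff l pvOpenSpace).mp hF1
    rw [pv_start_eq_right l i2 hF1 hF2, Int.toNat_natCast]
    exact ⟨Int.natCast_nonneg i2, Or.inr hocc2, fun m hm => ⟨hall1 m, hmin2 m hm⟩⟩
  · obtain ⟨hocc1, hmin1⟩ := pv_find_spec' l pvOpenSpace i1 hF1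
    have hall2 := (pv_find_none_iff l pvOpenPlain).mp hF2
    rw [pv_start_eq_left l i1 hF1 hF2, Int.toNat_natCast]
    exact ⟨Int.natCast_nonneg i1, Or.inl hocc1, fun m hm => ⟨hmin1 m hm, hall2 m⟩⟩
  · obtain ⟨hocc1, hmin1⟩ := pv_find_spec' l pvOpenSpace i1 hF1
    obtain ⟨hocc2, hmin2⟩ := pv_find_spec' l pvOpenPlain i2 hF2
    have hst : pvStart l = ((min i1 i2 : Nat) : Int) := by
      rw [pv_start_eq_min l i1 i2 hF1 hF2, Nat.cast_min]
    rw [hst, Int.toNat_natCast]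
    refine ⟨Int.natCast_nonneg _, ?_, ?_⟩
    · rcases Nat.le_total i1 i2 with hle | hle
      · rw [Nat.min_eq_left hle]; exact Or.inl hocc1
      · rw [Nat.min_eq_right hle]; exact Or.inr hocc2
    · intro m hm
      exact ⟨hmin1 m (by omega), hmin2 m (by omega)⟩

lemma pv_start_take_none (s : List Char) (j : Nat) (h : pvStart s = -1) :
    pvStart (s.take j) = -1 := by
  obtain ⟨h1, h2⟩ := (pv_start_neg_iff s).mp h
  rw [pv_start_neg_iff]
  exact ⟨pv_find_take_of_none s pvOpenSpace j (by simp [pvOpenSpace])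
      (fun i _ => (pv_find_none_iff s pvOpenSpace).mp h1 i),
    pv_find_take_of_none s pvOpenPlain j (by simp [pvOpenPlain])
      (fun i _ => (pv_find_none_iff s pvOpenPlain).mp h2 i)⟩

lemma pv_start_take_ge (s : List Char) (j : Nat) (hne : pvStart s ≠ -1)
    (hge : (j : Int) ≤ pvStart s) : pvStart (s.take j) = -1 := by
  obtain ⟨h0, _, hmin⟩ := pv_start_spec s hne
  rw [pv_start_neg_iff]
  exact ⟨pv_find_take_of_none s pvOpenSpace j (by simp [pvOpenSpace])
      (fun i hi => (hmin i (by omega)).1),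
    pv_find_take_of_none s pvOpenPlain j (by simp [pvOpenPlain])
      (fun i hi => (hmin i (by omega)).2)⟩

lemma pv_start_take_lt (s : List Char) (j : Nat) (hc : pvOcc pvCloserTag s j)
    (hne : pvStart s ≠ -1) (hlt : pvStart s < (j : Int)) :
    pvStart (s.take j) = pvStart s := by
  rcases pv_find_cases s pvOpenSpace with hF1 | ⟨i1, hF1⟩ <;>
    rcases pv_find_cases s pvOpenPlain with hF2 | ⟨i2, hF2⟩
  · exact absurd ((pv_start_neg_iff s).mpr ⟨hF1, hF2⟩) hne
  · have hst := pv_start_eq_right s i2 hF1 hF2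
    have hi2 : i2 < j := by rw [hst] at hlt; omega
    have e1 : PySem.Chars.find (s.take j) pvOpenSpace = -1 :=
      pv_find_take_of_none s pvOpenSpace j (by simp [pvOpenSpace])
        (fun i _ => (pv_find_none_iff s pvOpenSpace).mp hF1 i)
    have e2 := pv_find_take_of_lt s pvOpenPlain j i2 (Or.inr rfl) hF2 hi2 hc
    rw [hst, pv_start_eq_right (s.take j) i2 e1 e2]
  · have hst := pv_start_eq_left s i1 hF1 hF2
    have hi1 : i1 < j := by rw [hst] at hlt; omega
    have e2 : PySem.Chars.find (s.take j) pvOpenPlain = -1 :=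
      pv_find_take_of_none s pvOpenPlain j (by simp [pvOpenPlain])
        (fun i _ => (pv_find_none_iff s pvOpenPlain).mp hF2 i)
    have e1 := pv_find_take_of_lt s pvOpenSpace j i1 (Or.inl rfl) hF1 hi1 hc
    rw [hst, pv_start_eq_left (s.take j) i1 e1 e2]
  · have hst := pv_start_eq_min s i1 i2 hF1 hF2
    obtain ⟨hocc1, hmin1⟩ := pv_find_spec' s pvOpenSpace i1 hF1
    obtain ⟨hocc2, hmin2⟩ := pv_find_spec' s pvOpenPlain i2 hF2
    rcases Nat.le_total i1 i2 with hle | hle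
    · have hi1 : i1 < j := by rw [hst] at hlt; omega
      have e1 := pv_find_take_of_lt s pvOpenSpace j i1 (Or.inl rfl) hF1 hi1 hc
      rcases Nat.lt_or_ge i2 j with h2 | h2
      · have e2 := pv_find_take_of_lt s pvOpenPlain j i2 (Or.inr rfl) hF2 h2 hc
        rw [hst, pv_start_eq_min (s.take j) i1 i2 e1 e2]
      · have e2 : PySem.Chars.find (s.take j) pvOpenPlain = -1 :=
          pv_find_take_of_none s pvOpenPlain j (by simp [pvOpenPlain])
            (fun i hi => hmin2 i (by omega))
        rw [hst, pv_start_eq_left (s.take j) i1 e1 e2]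
        omega
    · have hi2 : i2 < j := by rw [hst] at hlt; omega
      have e2 := pv_find_take_of_lt s pvOpenPlain j i2 (Or.inr rfl) hF2 hi2 hc
      rcases Nat.lt_or_ge i1 j with h1 | h1
      · have e1 := pv_find_take_of_lt s pvOpenSpace j i1 (Or.inl rfl) hF1 h1 hc
        rw [hst, pv_start_eq_min (s.take j) i1 i2 e1 e2]
      · have e1 : PySem.Chars.find (s.take j) pvOpenSpace = -1 :=
          pv_find_take_of_none s pvOpenSpace j (by simp [pvOpenSpace])
            (fun i hi => hmin1 i (by omega))
        rw [hst, pv_start_eq_right (s.take j) i2 e1 e2]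
        omega

-- no opener anywhere: B produces nothing
lemma pv_bres_nil : ∀ (n : Nat) (s : List Char), s.length = n → pvStart s = -1 →
    pvBresL s = [] := by
  intro n
  induction n using Nat.strong_induction_on with
  | _ n ih =>
    intro s hlen hstart
    obtain ⟨hF1, hF2⟩ := (pv_start_neg_iff s).mp hstart
    have hC : pvCloserTag ≠ [] := by simp [pvCloserTag]
    rcases pv_find_cases s pvCloserTag with hc | ⟨j, hc⟩
    · unfold pvBresL
      rw [pv_splitOn_none s pvCloserTag hC hc]
      simp
    · obtain ⟨hoccC, _⟩ := pv_find_spec' s pvCloserTag j hc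
      have hjlen : j + 8 ≤ s.length := by
        have := pv_occ_length pvCloserTag s j hC hoccC
        simpa [pvCloserTag] using this
      have hsplit := pv_splitOn_at pvCloserTag hC j s hc
      rw [show pvCloserTag.length = 8 from rfl] at hsplit
      have hrest : pvStart (s.drop (j + 8)) = -1 := by
        rw [pv_start_neg_iff]
        constructor
        · rw [pv_find_none_iff]
          intro i hocc
          exact (pv_find_none_iff s pvOpenSpace).mp hF1 (j + 8 + i)
            ((pv_occ_drop _ s (j + 8) i).mp hocc)
        · rw [pv_find_none_iff]
          intro i hocc
          exact (pv_find_none_iff s pvOpenPlain).mp hF2 (j + 8 + i)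
            ((pv_occ_drop _ s (j + 8) i).mp hocc)
      have hp : pvP (s.take j) = false := by
        simp only [pvP, decide_eq_false_iff_not, ne_eq, not_not]
        exact pv_start_take_none s j hstart
      have hrec := ih (s.length - (j + 8)) (by omega) (s.drop (j + 8)) (by simp) hrest
      unfold pvBresL at hrec ⊢
      rw [hsplit, List.dropLast_cons_of_ne_nil (pv_splitOn_ne_nil _ _), List.filter_cons, hp]
      simpa using hrec

-- the main equivalence on char lists
lemma pv_main : ∀ (n : Nat) (s : List Char), s.length = n →
    extract_cot_events_py_loop s [] 0 = pvBresL s := by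
  intro n
  induction n using Nat.strong_induction_on with
  | _ n ih =>
    intro s hlen
    have hC : pvCloserTag ≠ [] := by simp [pvCloserTag]
    rcases pv_find_cases s pvCloserTag with hc | ⟨j, hc⟩
    · -- no closer anywhere: both sides empty
      have hBres : pvBresL s = [] := by
        unfold pvBresL
        rw [pv_splitOn_none s pvCloserTag hC hc]
        simp
      rw [hBres, pv_loop_unfold]
      by_cases h1 : (PySem.Chars.findFrom s pvOpenSpace ((0 : Nat) : Int) = -1 ∧
          PySem.Chars.findFrom s pvOpenPlain ((0 : Nat) : Int) = -1)
      · rw [if_pos h1]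
      · rw [if_neg h1]
        have h2 : PySem.Chars.findFrom s pvCloserTag (pvStartFrom s 0) = -1 := by
          by_contra h2
          obtain ⟨_, _, _, _, _, hocc⟩ := pv_step_bounds s 0 h1 h2
          exact ((pv_find_none_iff s pvCloserTag).mp hc _) hocc
        rw [if_pos h2]
    · obtain ⟨hoccC, hminC⟩ := pv_find_spec' s pvCloserTag j hc
      have hjlen : j + 8 ≤ s.length := by
        have := pv_occ_length pvCloserTag s j hC hoccC
        simpa [pvCloserTag] using this
      have hsplit := pv_splitOn_at pvCloserTag hC j s hc
      rw [show pvCloserTag.length = 8 from rfl] at hsplit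
      have hBres : pvBresL s
          = (if pvP (s.take j) then [pvF (s.take j)] else []) ++ pvBresL (s.drop (j + 8)) := by
        unfold pvBresL
        rw [hsplit, List.dropLast_cons_of_ne_nil (pv_splitOn_ne_nil _ _), List.filter_cons]
        by_cases hp : pvP (s.take j) <;> simp [hp]
      by_cases hstart : pvStart s = -1
      · have hB0 : pvBresL s = [] := pv_bres_nil s.length s rfl hstart
        obtain ⟨hF1, hF2⟩ := (pv_start_neg_iff s).mp hstart
        rw [hB0, pv_loop_unfold,
          if_pos ⟨by rw [pv_findFrom_zero']; exact hF1, by rw [pv_findFrom_zero']; exact hF2⟩]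
      · obtain ⟨h0st, hoccO, hminO⟩ := pv_start_spec s hstart
        have hcond : ¬(PySem.Chars.findFrom s pvOpenSpace ((0 : Nat) : Int) = -1 ∧
            PySem.Chars.findFrom s pvOpenPlain ((0 : Nat) : Int) = -1) := by
          rw [pv_findFrom_zero', pv_findFrom_zero']
          intro hcon
          exact hstart ((pv_start_neg_iff s).mpr hcon)
        rcases Nat.lt_or_ge (pvStart s).toNat j with hstj | hstj
        · -- earliest opener lies before the closer: A extracts the block
          have hend : PySem.Chars.findFrom s pvCloserTag (pvStart s) = (j : Int) := by
            rw [show pvStart s = (((pvStart s).toNat : Nat) : Int) from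
              (Int.toNat_of_nonneg h0st).symm]
            exact pv_findFrom_first s pvCloserTag (pvStart s).toNat j (by omega) (by omega)
              hoccC (fun i _ hij => hminC i hij)
          rw [pv_loop_unfold, if_neg hcond, pv_startFrom_zero, hend,
            if_neg (show ¬((j : Int) = -1) from by omega),
            show ((j : Int) + 8).toNat = j + 8 from by omega]
          rw [pv_loop_acc (s.length + 1 - (j + 8)) s _ (j + 8) rfl]
          rw [pv_loop_shift (s.length - (j + 8)) s (j + 8) rfl (by omega)]
          rw [ih (s.length - (j + 8)) (by omega) (s.drop (j + 8)) (by simp)]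
          rw [hBres]
          have hstk : pvStart (s.take j) = pvStart s :=
            pv_start_take_lt s j hoccC hstart (by omega)
          have hP : pvP (s.take j) = true := by
            simp only [pvP, decide_eq_true_eq, ne_eq, hstk]
            exact hstart
          rw [if_pos hP]
          simp only [List.nil_append]
          congr 1
          -- the block itself
          unfold pvF
          rw [hstk]
          rw [show pvStart s = (((pvStart s).toNat : Nat) : Int) from
            (Int.toNat_of_nonneg h0st).symm]
          rw [show ((j : Int) + 8) = ((j + 8 : Nat) : Int) from by push_cast; ring]
          rw [PySem.List.slice_natCast, PySem.List.slice_from_natCast]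
          rw [List.drop_take]
          rw [show j + 8 - (pvStart s).toNat = (j - (pvStart s).toNat) + 8 from by omega,
            List.take_add]
          rw [List.drop_drop, show (pvStart s).toNat + (j - (pvStart s).toNat) = j from by omega]
          have hCtake := List.prefix_iff_eq_take.mp hoccC
          rw [show pvCloserTag.length = 8 from rfl] at hCtake
          rw [hCtake]
        · -- earliest opener lies at or after the closer: A skips this closer
          have hskip : j + 8 ≤ (pvStart s).toNat := by
            rcases hoccO with hO | hO
            · rcases pv_no_overlap s pvOpenSpace (Or.inl rfl) (pvStart s).toNat j hO hoccC
                with h' | h' <;> omega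
            · rcases pv_no_overlap s pvOpenPlain (Or.inr rfl) (pvStart s).toNat j hO hoccC
                with h' | h' <;> omega
          rw [pv_loop_skip s (j + 8) (by omega) (fun m hm => hminO m (by omega))]
          rw [pv_loop_shift (s.length - (j + 8)) s (j + 8) rfl (by omega)]
          rw [ih (s.length - (j + 8)) (by omega) (s.drop (j + 8)) (by simp)]
          rw [hBres]
          have hP : pvP (s.take j) = false := by
            simp only [pvP, decide_eq_false_iff_not, ne_eq, not_not]
            exact pv_start_take_ge s j hstart (by omega)
          rw [if_neg (show ¬(pvP (s.take j) = true) from by rw [hP]; simp)]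
          simp

-- bridging the fold in port B to filter/map
lemma pv_alt_eq (data : String) :
    extract_cot_events_py_alt data = (pvBresL data.toList).map (fun cs => String.ofList cs) := by
  unfold extract_cot_events_py_alt pvBresL
  simp only []
  congr 1
  have hfun : (fun (events : List (List Char)) (chunk : List Char) =>
      let idx_space := PySem.Chars.find chunk pvOpenSpace
      let idx_plain := PySem.Chars.find chunk pvOpenPlain
      let start : Int :=
        if idx_space = -1 then idx_plain
        else if idx_plain = -1 then idx_space
        else min idx_space idx_plain
      if start ≠ -1 then events ++ [PySem.List.slice chunk (some start) none ++ pvCloserTag]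
      else events) =
      (fun (acc : List (List Char)) (x : List Char) =>
        if pvP x = true then acc ++ [pvF x] else acc) := by
    funext events chunk
    simp only [pvP, pvF, pvStart, pvComb, decide_eq_true_eq]
  rw [hfun, PySem.List.foldl_append_if]
  simp

-- ===== VERDICT (by name: the statement is the Claim_ definition above) =====
theorem extract_cot_events_py_spec : Claim_equal_extract_cot_events_py := by
  intro data _
  unfold Spec_extract_cot_events_py extract_cot_events_py
  rw [pv_alt_eq data, pv_main data.toList.length data.toList rfl]
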